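-- pv_equiv track=rewrite | github.com/edwardianec/hystogram_equalization | fuzzy_processing_v4.py | histogram_borders
-- ===== SOURCE A (Python) =====
-- def histogram_borders(h, member_vds):
-- 	keys = list(h.keys())
-- 	for el in h:
-- 		if (h[el]>20):
-- 			left = el
-- 			break
-- 	for el in reversed(keys):
-- 		if (h[el]>20):
-- 			right = el
-- 			break
-- 	if (right < member_vds[1]): right = member_vds[1]
-- 	if (left > member_vds[-2]): left = member_vds[-2]
-- 	return (left, right)
-- ===== SOURCE B (Python) =====
-- def histogram_borders(h, member_vds):
--     left = right = None
--     for k, v in h.items():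
--         if v > 20:
--             if left is None:
--                 left = k
--             right = k
--     right = max(right, member_vds[1])
--     left = min(left, member_vds[-2])
--     return (left, right)
-- ===== Notes on version B (the rewrite author's own statement) =====
-- stated objective: alternative
-- what changed: Replaces A's two scans (forward break-scan for the first key with count>20, reversed break-scan for the last) plus two if-clamps with a single forward pass over h.items() maintaining first/last matching keys, then min/max clamping.
import Mathlib
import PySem

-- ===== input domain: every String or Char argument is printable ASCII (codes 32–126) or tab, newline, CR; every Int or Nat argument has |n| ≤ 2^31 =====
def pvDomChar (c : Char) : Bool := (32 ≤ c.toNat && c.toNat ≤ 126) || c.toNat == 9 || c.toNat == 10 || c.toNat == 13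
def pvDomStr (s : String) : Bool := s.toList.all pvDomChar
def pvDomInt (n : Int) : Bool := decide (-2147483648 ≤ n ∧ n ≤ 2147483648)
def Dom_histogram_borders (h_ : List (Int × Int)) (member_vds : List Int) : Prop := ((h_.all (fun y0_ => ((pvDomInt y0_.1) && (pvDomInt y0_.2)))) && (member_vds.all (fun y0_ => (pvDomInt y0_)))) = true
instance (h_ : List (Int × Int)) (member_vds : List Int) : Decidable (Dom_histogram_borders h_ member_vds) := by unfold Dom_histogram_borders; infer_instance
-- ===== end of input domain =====

-- B fuses A's two break-scans (forward for the first key with count>20, reversed for the last) into one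
-- forward pass over the items, then clamps with min/max instead of the two ifs. Objective: alternative.

-- ===== PORT A =====
-- first key `el` in `ks` (dict iteration order) with h[el] > 20; none = the loop falls through (NameError in A)
def pvFirstOver (d : PySem.Dict Int Int) : List Int → Option Int
  | [] => none
  | k :: ks => if d.getD k 0 > 20 then some k else pvFirstOver d ks

def histogram_borders (h_ : List (Int × Int)) (member_vds : List Int) : Int × Int :=
  let d := PySem.Dict.ofList h_
  let keys := d.keys
  match pvFirstOver d keys, pvFirstOver d keys.reverse,
        PySem.List.pyGet? member_vds 1, PySem.List.pyGet? member_vds (-2) with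
  | some left, some right, some m1, some m2 =>
      let right := if right < m1 then m1 else right
      let left := if left > m2 then m2 else left
      (left, right)
  | _, _, _, _ => (0, 0)   -- Python raises here (NameError / IndexError); outside Pre_

-- ===== PORT B =====
def histogram_borders_alt (h_ : List (Int × Int)) (member_vds : List Int) : Int × Int :=
  let pr := (PySem.Dict.ofList h_).items.foldl
      (fun (acc : Option Int × Option Int) (kv : Int × Int) =>
        if kv.2 > 20 then
          ((if acc.1.isNone then some kv.1 else acc.1), some kv.1)
        else acc) (none, none)
  -- Python raises (TypeError / IndexError) where any of these is none; outside Pre_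
  (do
    let left ← pr.1
    let right ← pr.2
    let m1 ← PySem.List.pyGet? member_vds 1
    let m2 ← PySem.List.pyGet? member_vds (-2)
    pure (min left m2, max right m1)).getD (0, 0)

-- ===== PRECONDITION & SPEC =====
-- Excludes exactly the inputs where A raises: no count > 20 (NameError) or member_vds shorter than 2 (IndexError).
def Pre_histogram_borders (h_ : List (Int × Int)) (member_vds : List Int) : Prop :=
  ((PySem.Dict.ofList h_).items.any (fun kv => kv.2 > 20)) = true ∧ 2 ≤ member_vds.length
instance (h_ : List (Int × Int)) (member_vds : List Int) : Decidable (Pre_histogram_borders h_ member_vds) := by unfold Pre_histogram_borders; infer_instance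
def pvWitness_histogram_borders : (List (Int × Int)) × List Int := ([(1, 30), (2, 5), (3, 25)], [0, 1, 2, 3])

def Spec_histogram_borders (h_ : List (Int × Int)) (member_vds : List Int) (out : Int × Int) : Prop := out = histogram_borders_alt h_ member_vds
instance (h_ : List (Int × Int)) (member_vds : List Int) (out : Int × Int) : Decidable (Spec_histogram_borders h_ member_vds out) := by unfold Spec_histogram_borders; infer_instance

-- ===== CLAIM (what is proved, stated in full; the proofs are below) =====
def Claim_equal_histogram_borders : Prop := ∀ (h_ : List (Int × Int)) (member_vds : List Int), Dom_histogram_borders h_ member_vds → Pre_histogram_borders h_ member_vds → Spec_histogram_borders h_ member_vds (histogram_borders h_ member_vds)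

-- ===== LEMMAS AND PROOFS =====

-- scanning keys with lookups = scanning the pairs directly, when every listed pair agrees with the dict
theorem pvFirstOver_map_fst (d : PySem.Dict Int Int) (l : List (Int × Int))
    (h : ∀ kv ∈ l, d.getD kv.1 0 = kv.2) :
    pvFirstOver d (l.map (·.1)) = (l.find? (fun kv => kv.2 > 20)).map (·.1) := by
  induction l with
  | nil => rfl
  | cons kv l ih =>
    have hk := h kv (List.mem_cons_self ..)
    rw [List.map_cons]
    simp only [pvFirstOver, hk]
    by_cases hgt : kv.2 > 20
    · rw [if_pos hgt, List.find?_cons_of_pos (by simpa using hgt)]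
      rfl
    · rw [if_neg hgt, List.find?_cons_of_neg (by simpa using hgt)]
      exact ih (fun x hx => h x (List.mem_cons_of_mem _ hx))

-- the fused fold computes (first match, last match) of the pairs list
theorem pvFold_spec (l : List (Int × Int)) (acc : Option Int × Option Int) :
    l.foldl (fun (acc : Option Int × Option Int) (kv : Int × Int) =>
        if kv.2 > 20 then
          ((if acc.1.isNone then some kv.1 else acc.1), some kv.1)
        else acc) acc =
      (acc.1.or ((l.find? (fun kv => kv.2 > 20)).map (·.1)),
       ((l.reverse.find? (fun kv => kv.2 > 20)).map (·.1)).or acc.2) := by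
  induction l generalizing acc with
  | nil => cases acc with | mk a b => cases a <;> cases b <;> rfl
  | cons kv l ih =>
    simp only [List.foldl_cons, List.reverse_cons]
    by_cases hgt : kv.2 > 20
    · rw [if_pos hgt, ih, List.find?_cons_of_pos (by simpa using hgt), List.find?_append]
      cases l.reverse.find? (fun kv => decide (kv.2 > 20)) <;>
        cases acc.1 <;>
        simp [hgt]
    · rw [if_neg hgt, ih, List.find?_cons_of_neg (by simpa using hgt), List.find?_append]
      cases l.reverse.find? (fun kv => decide (kv.2 > 20)) <;>
        cases acc.1 <;>
        simp [hgt]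

-- ===== VERDICT (by name: the statement is the Claim_ definition above) =====
theorem histogram_borders_spec : Claim_equal_histogram_borders := by
  intro h_ member_vds _hdom hpre
  obtain ⟨hany, hlen⟩ := hpre
  unfold Spec_histogram_borders histogram_borders histogram_borders_alt
  have hnd : (PySem.Dict.ofList h_).keys.Nodup := PySem.Dict.nodup_keys_ofList h_
  have hagree : ∀ kv ∈ (PySem.Dict.ofList h_).items, (PySem.Dict.ofList h_).getD kv.1 0 = kv.2 := by
    intro kv hkv
    obtain ⟨k, v⟩ := kv
    exact PySem.Dict.getD_of_mem_items _ hkv hnd 0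
  have hfwd := pvFirstOver_map_fst (PySem.Dict.ofList h_) (PySem.Dict.ofList h_).items hagree
  have hbwd := pvFirstOver_map_fst (PySem.Dict.ofList h_) (PySem.Dict.ofList h_).items.reverse
    (fun kv hkv => hagree kv (List.mem_reverse.mp hkv))
  have hkeys : (PySem.Dict.ofList h_).keys = (PySem.Dict.ofList h_).items.map (·.1) := rfl
  simp only [hkeys, ← List.map_reverse, hfwd, hbwd, pvFold_spec]
  -- a match exists, so both find?s are some
  have hex : ∃ kv ∈ (PySem.Dict.ofList h_).items, (fun kv : Int × Int => decide (kv.2 > 20)) kv = true := by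
    simpa [List.any_eq_true] using hany
  obtain ⟨kf, hmemf, hkf⟩ := hex
  have hf : (List.find? (fun kv => decide (kv.2 > 20)) (PySem.Dict.ofList h_).items).isSome :=
    List.find?_isSome.mpr ⟨kf, hmemf, hkf⟩
  have hr : (List.find? (fun kv => decide (kv.2 > 20)) (PySem.Dict.ofList h_).items.reverse).isSome :=
    List.find?_isSome.mpr ⟨kf, List.mem_reverse.mpr hmemf, hkf⟩
  obtain ⟨wf, hwf⟩ := Option.isSome_iff_exists.mp hf
  obtain ⟨wr, hwr⟩ := Option.isSome_iff_exists.mp hr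
  -- member_vds has length ≥ 2, so both indexings succeed
  have h1 : (PySem.List.pyGet? member_vds 1).isSome := by
    simp [PySem.List.pyGet?, PySem.List.pyIdx?]
    split_ifs <;> simp_all <;> omega
  have h2 : (PySem.List.pyGet? member_vds (-2)).isSome := by
    simp [PySem.List.pyGet?, PySem.List.pyIdx?]
    split_ifs <;> simp_all <;> omega
  obtain ⟨m1, hm1⟩ := Option.isSome_iff_exists.mp h1
  obtain ⟨m2, hm2⟩ := Option.isSome_iff_exists.mp h2
  rw [hwf, hwr, hm1, hm2]
  simp only [Option.map_some, Option.none_or, Option.or_none]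
  refine Prod.ext ?_ ?_ <;> simp [min_def, max_def] <;> split_ifs <;> omega
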